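-- pv_equiv track=rewrite | github.com/vanbersjtu/EditPre | data_process_src/pipeline/compare_plan_accuracy.py | compare_roles
-- ===== SOURCE A (Python) =====
-- from typing import Dict, FrozenSet, Iterable, List, Optional, Tuple
--
-- def compare_roles(
--     gt_roles: Dict[str, str],
--     pred_roles: Dict[str, str],
-- ) -> Tuple[int, int, int, int]:
--     total = len(gt_roles)
--     covered = 0
--     correct = 0
--     for item_id, gt_role in gt_roles.items():
--         pred_role = pred_roles.get(item_id)
--         if pred_role is None:
--             continue
--         covered += 1
--         if pred_role == gt_role:
--             correct += 1
--     extra = sum(1 for item_id in pred_roles if item_id not in gt_roles)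
--     return total, covered, correct, extra
-- ===== SOURCE B (Python) =====
-- def compare_roles(gt_roles, pred_roles):
--     # single pass over pred_roles: classify each predicted key as covered/correct or extra
--     covered = 0
--     correct = 0
--     extra = 0
--     for k, v in pred_roles.items():
--         g = gt_roles.get(k)
--         if g is None:
--             extra += 1
--         else:
--             covered += 1
--             if v == g:
--                 correct += 1
--     return len(gt_roles), covered, correct, extra
-- ===== Notes on version B (the rewrite author's own statement) =====
-- stated objective: simpler
-- what changed: B replaces A's two separate passes (a loop over gt_roles for covered/correct plus a generator sum over pred_roles for extra) with one single pass over pred_roles that classifies each predicted key as covered/correct or extra.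
import Mathlib
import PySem

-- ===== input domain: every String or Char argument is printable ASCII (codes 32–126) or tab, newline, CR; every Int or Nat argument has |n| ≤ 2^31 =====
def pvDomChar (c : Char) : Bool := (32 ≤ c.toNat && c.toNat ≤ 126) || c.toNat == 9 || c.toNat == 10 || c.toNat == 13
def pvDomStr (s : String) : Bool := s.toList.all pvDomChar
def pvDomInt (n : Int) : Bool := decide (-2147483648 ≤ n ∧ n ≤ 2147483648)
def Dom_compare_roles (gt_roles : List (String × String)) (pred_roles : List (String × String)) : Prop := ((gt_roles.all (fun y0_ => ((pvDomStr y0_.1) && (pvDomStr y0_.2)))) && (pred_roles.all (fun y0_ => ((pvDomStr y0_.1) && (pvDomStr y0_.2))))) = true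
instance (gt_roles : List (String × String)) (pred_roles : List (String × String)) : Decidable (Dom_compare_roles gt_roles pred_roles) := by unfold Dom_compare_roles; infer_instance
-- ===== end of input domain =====

-- B merges A's two passes (loop over gt for covered/correct, sum over pred for extra)
-- into one single pass over pred_roles; return values proved equal (objective: simpler).

-- ===== PORT A =====
-- A: total = len(gt); loop over gt.items() accumulating covered/correct via pred.get;
--    extra = sum(1 for k in pred if k not in gt).
def compare_roles (gt_roles : List (String × String)) (pred_roles : List (String × String)) : Int × Int × Int × Int :=
  let gtd := PySem.Dict.ofList gt_roles
  let predd := PySem.Dict.ofList pred_roles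
  let total : Int := gtd.size
  let cc : Int × Int := gtd.items.foldl
    (fun (cc : Int × Int) p =>
      match predd.get? p.1 with
      | none => cc
      | some pr => (cc.1 + 1, if pr == p.2 then cc.2 + 1 else cc.2)) (0, 0)
  let extra : Int := ((predd.keys.filter (fun k => !(gtd.contains k))).map (fun _ => (1 : Int))).sum
  (total, cc.1, cc.2, extra)

-- ===== PORT B =====
-- B: one pass over pred.items(), classifying each key as covered(/correct) or extra.
def compare_roles_alt (gt_roles : List (String × String)) (pred_roles : List (String × String)) : Int × Int × Int × Int :=
  let gtd := PySem.Dict.ofList gt_roles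
  let predd := PySem.Dict.ofList pred_roles
  let s : Int × Int × Int := predd.items.foldl
    (fun (s : Int × Int × Int) q =>
      match gtd.get? q.1 with
      | none => (s.1, s.2.1, s.2.2 + 1)
      | some g => (s.1 + 1, (if q.2 == g then s.2.1 + 1 else s.2.1), s.2.2)) (0, 0, 0)
  (gtd.size, s.1, s.2.1, s.2.2)

-- ===== PRECONDITION & SPEC =====
def Spec_compare_roles (gt_roles : List (String × String)) (pred_roles : List (String × String)) (out : Int × Int × Int × Int) : Prop := out = compare_roles_alt gt_roles pred_roles
instance (gt_roles : List (String × String)) (pred_roles : List (String × String)) (out : Int × Int × Int × Int) : Decidable (Spec_compare_roles gt_roles pred_roles out) := by unfold Spec_compare_roles; infer_instance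

-- ===== CLAIM (what is proved, stated in full; the proofs are below) =====
def Claim_equal_compare_roles : Prop := ∀ (gt_roles : List (String × String)) (pred_roles : List (String × String)), Dom_compare_roles gt_roles pred_roles → Spec_compare_roles gt_roles pred_roles (compare_roles gt_roles pred_roles)

-- ===== LEMMAS AND PROOFS =====

-- two nodup lists with matching filtered membership have equal countP
theorem pvCountP_sym {α : Type} [DecidableEq α] {l1 l2 : List α} (h1 : l1.Nodup) (h2 : l2.Nodup)
    (p1 p2 : α → Bool) (h : ∀ x, (x ∈ l1 ∧ p1 x = true) ↔ (x ∈ l2 ∧ p2 x = true)) :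
    l1.countP p1 = l2.countP p2 := by
  rw [List.countP_eq_length_filter, List.countP_eq_length_filter,
      ← List.toFinset_card_of_nodup (h1.filter p1), ← List.toFinset_card_of_nodup (h2.filter p2)]
  congr 1
  ext x
  simp only [List.mem_toFinset, List.mem_filter]
  exact h x

-- A's covered/correct loop computes two countP's
theorem pvFoldA (P : PySem.Dict String String) (l : List (String × String)) (c1 c2 : Int) :
    l.foldl (fun (cc : Int × Int) p =>
      match P.get? p.1 with
      | none => cc
      | some pr => (cc.1 + 1, if pr == p.2 then cc.2 + 1 else cc.2)) (c1, c2)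
    = (c1 + (l.countP (fun p => (P.get? p.1).isSome) : Int),
       c2 + (l.countP (fun p => P.get? p.1 == some p.2) : Int)) := by
  induction l generalizing c1 c2 with
  | nil => simp
  | cons a t ih =>
    rw [List.foldl_cons, List.countP_cons, List.countP_cons]
    rcases hga : P.get? a.1 with _ | pr
    · simp only []
      rw [ih]
      simp
    · by_cases hv : pr = a.2
      · simp only [hv, beq_self_eq_true, if_true]
        rw [ih]
        simp [Prod.ext_iff]
        omega
      · have hb : (pr == a.2) = false := beq_eq_false_iff_ne.mpr hv
        simp only [hb]
        rw [ih]
        have hb' : (some pr == some a.2) = false := by simp [hv]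
        simp [hb', Prod.ext_iff]
        omega

-- B's single loop computes three countP's
theorem pvFoldB (G : PySem.Dict String String) (l : List (String × String)) (c1 c2 c3 : Int) :
    l.foldl (fun (s : Int × Int × Int) q =>
      match G.get? q.1 with
      | none => (s.1, s.2.1, s.2.2 + 1)
      | some g => (s.1 + 1, (if q.2 == g then s.2.1 + 1 else s.2.1), s.2.2)) (c1, c2, c3)
    = (c1 + (l.countP (fun q => (G.get? q.1).isSome) : Int),
       c2 + (l.countP (fun q => G.get? q.1 == some q.2) : Int),
       c3 + (l.countP (fun q => !(G.get? q.1).isSome) : Int)) := by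
  induction l generalizing c1 c2 c3 with
  | nil => simp
  | cons a t ih =>
    rw [List.foldl_cons, List.countP_cons, List.countP_cons, List.countP_cons]
    rcases hga : G.get? a.1 with _ | g
    · simp only []
      rw [ih]
      simp [Prod.ext_iff]
      omega
    · by_cases hv : a.2 = g
      · simp only [hv, beq_self_eq_true, if_true]
        rw [ih]
        have hg : (some g == some a.2) = true := by simp [hv]
        simp [Prod.ext_iff]
        omega
      · have hb : (a.2 == g) = false := beq_eq_false_iff_ne.mpr hv
        simp only [hb]
        rw [ih]
        have hg : (some g == some a.2) = false := by simp; exact fun h => hv (Eq.symm h)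
        simp [hg, Prod.ext_iff]
        omega

-- the covered counts agree: both count keys present in both dicts
theorem pvCovered (G P : PySem.Dict String String)
    (hG : G.keys.Nodup) (hP : P.keys.Nodup) :
    G.items.countP (fun p => (P.get? p.1).isSome)
      = P.items.countP (fun q => (G.get? q.1).isSome) := by
  have h1 : G.items.countP (fun p => (P.get? p.1).isSome)
      = G.keys.countP (fun k => (P.get? k).isSome) := by
    simp only [PySem.Dict.keys, List.countP_map]
    rfl
  have h2 : P.items.countP (fun q => (G.get? q.1).isSome)
      = P.keys.countP (fun k => (G.get? k).isSome) := by
    simp only [PySem.Dict.keys, List.countP_map]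
    rfl
  rw [h1, h2]
  refine pvCountP_sym hG hP _ _ (fun k => ?_)
  constructor
  · rintro ⟨hk, hs⟩
    refine ⟨?_, ?_⟩
    · rcases Option.isSome_iff_exists.mp hs with ⟨v, hv⟩
      exact PySem.Dict.mem_keys_of_mem_items _ (PySem.Dict.mem_items_of_get?_eq_some _ hv)
    · rw [← PySem.Dict.contains_iff_mem_keys] at hk
      rw [← PySem.Dict.contains_eq_isSome_get?]; exact hk
  · rintro ⟨hk, hs⟩
    refine ⟨?_, ?_⟩
    · rcases Option.isSome_iff_exists.mp hs with ⟨v, hv⟩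
      exact PySem.Dict.mem_keys_of_mem_items _ (PySem.Dict.mem_items_of_get?_eq_some _ hv)
    · rw [← PySem.Dict.contains_iff_mem_keys] at hk
      rw [← PySem.Dict.contains_eq_isSome_get?]; exact hk

-- the correct counts agree: both count pairs present in both dicts
theorem pvCorrect (G P : PySem.Dict String String)
    (hG : G.keys.Nodup) (hP : P.keys.Nodup) :
    G.items.countP (fun p => P.get? p.1 == some p.2)
      = P.items.countP (fun q => G.get? q.1 == some q.2) := by
  have hGi : G.items.Nodup := by
    have := hG
    simp only [PySem.Dict.keys] at this
    exact this.of_map _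
  have hPi : P.items.Nodup := by
    have := hP
    simp only [PySem.Dict.keys] at this
    exact this.of_map _
  refine pvCountP_sym hGi hPi _ _ (fun x => ?_)
  obtain ⟨k, v⟩ := x
  simp only [beq_iff_eq]
  constructor
  · rintro ⟨hx, hpx⟩
    exact ⟨PySem.Dict.mem_items_of_get?_eq_some _ hpx,
           PySem.Dict.get?_of_mem_items _ hx hG⟩
  · rintro ⟨hx, hgx⟩
    exact ⟨PySem.Dict.mem_items_of_get?_eq_some _ hgx,
           PySem.Dict.get?_of_mem_items _ hx hP⟩

-- A's filtered constant-1 sum is B's countP over items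
theorem pvExtra (G P : PySem.Dict String String) :
    ((P.keys.filter (fun k => !(G.contains k))).map (fun _ => (1 : Int))).sum
      = (P.items.countP (fun q => !(G.get? q.1).isSome) : Int) := by
  rw [PySem.List.sum_map_const_int, ← List.countP_eq_length_filter]
  have : P.keys.countP (fun k => !(G.contains k))
      = P.items.countP (fun q => !(G.get? q.1).isSome) := by
    simp only [PySem.Dict.keys, List.countP_map, PySem.Dict.contains_eq_isSome_get?]
    rfl
  rw [this]; ring

-- ===== VERDICT (by name: the statement is the Claim_ definition above) =====
theorem compare_roles_spec : Claim_equal_compare_roles := by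
  intro gt pred _
  unfold Spec_compare_roles compare_roles compare_roles_alt
  simp only []
  rw [pvFoldA, pvFoldB, pvExtra]
  have hG := PySem.Dict.nodup_keys_ofList (κ := String) (ν := String) gt
  have hP := PySem.Dict.nodup_keys_ofList (κ := String) (ν := String) pred
  rw [pvCovered _ _ hG hP, pvCorrect _ _ hG hP]
  simp
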